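-- pv_equiv track=rewrite | github.com/samuller/advent-of-code | 2023/day20/main.py | init_memory
-- ===== SOURCE A (Python) =====
-- from collections import defaultdict, OrderedDict
--
-- def init_memory(modules):
--     memory = defaultdict(dict)
--     for src, (mtype, dests) in modules.items():
--         for dest in dests:
--             if dest not in modules:
--                 continue
--             dest_type, _ = modules[dest]
--             if dest_type == '&':
--                 memory[dest][src] = False
--     return memory
-- ===== SOURCE B (Python) =====
-- from collections import defaultdict
--
-- def init_memory(modules):
--     # Pass 1: reverse-adjacency index dest -> list of sources targeting it.
--     incoming = defaultdict(list)
--     for src, (_mtype, dests) in modules.items():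
--         for dest in dests:
--             incoming[dest].append(src)
--     # Pass 2: keep the conjunction modules, building each memory dict at once.
--     memory = defaultdict(dict)
--     for dest, srcs in incoming.items():
--         if dest in modules and modules[dest][0] == '&':
--             memory[dest] = {src: False for src in srcs}
--     return memory
-- ===== Notes on version B (the rewrite author's own statement) =====
-- stated objective: alternative
-- what changed: B replaces A's interleaved per-edge dict updates by a two-pass shape: first build a reverse-adjacency index dest -> sources, then one pass over that index emits each conjunction's full memory dict at once.
import Mathlib
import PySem

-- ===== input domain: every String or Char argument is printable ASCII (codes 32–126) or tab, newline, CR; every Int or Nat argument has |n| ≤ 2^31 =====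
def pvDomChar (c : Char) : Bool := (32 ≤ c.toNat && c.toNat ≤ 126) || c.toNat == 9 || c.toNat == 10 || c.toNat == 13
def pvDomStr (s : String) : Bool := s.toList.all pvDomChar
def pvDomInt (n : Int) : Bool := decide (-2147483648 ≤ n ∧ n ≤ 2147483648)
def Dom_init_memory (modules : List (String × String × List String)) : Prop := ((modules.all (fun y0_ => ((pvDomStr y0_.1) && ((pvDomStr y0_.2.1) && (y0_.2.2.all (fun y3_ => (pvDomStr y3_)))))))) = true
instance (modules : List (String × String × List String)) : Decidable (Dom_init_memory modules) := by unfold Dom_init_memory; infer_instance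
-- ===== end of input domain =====

-- B builds a reverse-adjacency index first and then emits each conjunction's memory in a
-- second pass, instead of A's interleaved per-edge updates of the nested dict (alternative
-- decomposition, same cost; return value proved equal).

-- Shared dict-as-assoc-list primitives (exact Python dict semantics on these ports:
-- lookup = first match, assignment overwrites in place keeping position, new keys append).
def pvGet? {α : Type} (l : List (String × α)) (k : String) : Option α :=
  match l with
  | [] => none
  | p :: rest => if p.1 == k then some p.2 else pvGet? rest k

def pvGetD {α : Type} (l : List (String × α)) (k : String) (dflt : α) : α :=
  (pvGet? l k).getD dflt

def pvSet {α : Type} (l : List (String × α)) (k : String) (v : α) : List (String × α) :=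
  match l with
  | [] => [(k, v)]
  | p :: rest => if p.1 == k then (k, v) :: rest else p :: pvSet rest k v

-- ===== PORT A =====
def init_memory (modules : List (String × String × List String)) : List (String × List (String × Bool)) :=
  modules.foldl (fun memory m =>
    m.2.2.foldl (fun memory dest =>
      match pvGet? modules dest with
      | none => memory                               -- 'if dest not in modules: continue'
      | some q =>                                    -- dest_type, _ = modules[dest]
        if q.1 == "&" then
          pvSet memory dest (pvSet (pvGetD memory dest []) m.1 false)  -- memory[dest][src] = False
        else memory) memory) []

-- ===== PORT B =====
def init_memory_alt (modules : List (String × String × List String)) : List (String × List (String × Bool)) :=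
  let incoming : List (String × List String) :=
    modules.foldl (fun inc m =>
      m.2.2.foldl (fun inc dest => pvSet inc dest (pvGetD inc dest [] ++ [m.1])) inc) []
  incoming.foldl (fun memory q =>
    match pvGet? modules q.1 with
    | some t => if t.1 == "&" then
        pvSet memory q.1 (q.2.foldl (fun d s => pvSet d s false) []) else memory
    | none => memory) []

-- ===== PRECONDITION & SPEC =====
def Spec_init_memory (modules : List (String × String × List String)) (out : List (String × List (String × Bool))) : Prop := out = init_memory_alt modules
instance (modules : List (String × String × List String)) (out : List (String × List (String × Bool))) : Decidable (Spec_init_memory modules out) := by unfold Spec_init_memory; infer_instance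

-- ===== CLAIM (what is proved, stated in full; the proofs are below) =====
def Claim_equal_init_memory : Prop := ∀ (modules : List (String × String × List String)), Dom_init_memory modules → Spec_init_memory modules (init_memory modules)

-- ===== LEMMAS AND PROOFS =====

-- 'dest is a conjunction module' as a predicate on the key only.
def pvConj (modules : List (String × String × List String)) (d : String) : Bool :=
  match pvGet? modules d with
  | some q => q.1 == "&"
  | none => false

def pvStepA (modules : List (String × String × List String))
    (mem : List (String × List (String × Bool))) (e : String × String) : List (String × List (String × Bool)) :=
  if pvConj modules e.2 then pvSet mem e.2 (pvSet (pvGetD mem e.2 []) e.1 false) else mem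

def pvMkInner (ss : List String) : List (String × Bool) :=
  ss.foldl (fun d s => pvSet d s false) []

def pvStepG (inc : List (String × List String)) (e : String × String) : List (String × List String) :=
  pvSet inc e.2 (pvGetD inc e.2 [] ++ [e.1])

def pvStep2 (modules : List (String × String × List String))
    (mem : List (String × List (String × Bool))) (q : String × List String) : List (String × List (String × Bool)) :=
  if pvConj modules q.1 then pvSet mem q.1 (pvMkInner q.2) else mem

def pvEdges (modules : List (String × String × List String)) : List (String × String) :=
  modules.flatMap (fun m => m.2.2.map (fun d => (m.1, d)))

def pvCF (modules : List (String × String × List String)) (inc : List (String × List String)) : List (String × List (String × Bool)) :=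
  (inc.filter (fun p => pvConj modules p.1)).map (fun p => (p.1, pvMkInner p.2))

theorem pv_foldl_congr {α β : Type} (l : List α) (f g : β → α → β) (init : β)
    (h : ∀ b a, f b a = g b a) : l.foldl f init = l.foldl g init := by
  induction l generalizing init with
  | nil => rfl
  | cons x xs ih => simp only [List.foldl_cons, h, ih]

theorem pv_foldl_flatMap {α β γ : Type} (l : List α) (f : α → List β) (g : γ → β → γ) (init : γ) :
    (l.flatMap f).foldl g init = l.foldl (fun acc x => (f x).foldl g acc) init := by
  induction l generalizing init with
  | nil => rfl
  | cons x xs ih => simp [List.flatMap_cons, List.foldl_append, ih]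

theorem init_memory_eq_foldl_edges (modules : List (String × String × List String)) :
    init_memory modules = (pvEdges modules).foldl (pvStepA modules) [] := by
  unfold pvEdges
  rw [pv_foldl_flatMap]
  unfold init_memory
  apply pv_foldl_congr
  intro mem m
  rw [List.foldl_map]
  apply pv_foldl_congr
  intro mem' d
  simp only [pvStepA, pvConj]
  cases pvGet? modules d <;> simp

theorem incoming_eq_foldl_edges (modules : List (String × String × List String)) :
    (modules.foldl (fun inc m =>
      m.2.2.foldl (fun inc dest => pvSet inc dest (pvGetD inc dest [] ++ [m.1])) inc) [])
    = (pvEdges modules).foldl pvStepG [] := by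
  unfold pvEdges
  rw [pv_foldl_flatMap]
  apply pv_foldl_congr
  intro inc m
  rw [List.foldl_map]
  rfl

theorem secondPass_eq (modules : List (String × String × List String)) (inc : List (String × List String)) :
    inc.foldl (fun memory q =>
      match pvGet? modules q.1 with
      | some t => if t.1 == "&" then
          pvSet memory q.1 (q.2.foldl (fun d s => pvSet d s false) []) else memory
      | none => memory) ([] : List (String × List (String × Bool)))
    = inc.foldl (pvStep2 modules) [] := by
  apply pv_foldl_congr
  intro mem q
  simp only [pvStep2, pvConj, pvMkInner]
  cases pvGet? modules q.1 <;> simp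

-- pvSet / pvGet? basics
theorem pvGet?_eq_none_iff {α : Type} (l : List (String × α)) (k : String) :
    pvGet? l k = none ↔ k ∉ l.map Prod.fst := by
  induction l with
  | nil => simp [pvGet?]
  | cons p rest ih =>
    by_cases h : p.1 = k
    · simp [pvGet?, h]
    · simp [pvGet?, beq_iff_eq, h, ih, Ne.symm h]

theorem pvSet_append_of_none {α : Type} (l : List (String × α)) (k : String) (v : α)
    (h : pvGet? l k = none) : pvSet l k v = l ++ [(k, v)] := by
  induction l with
  | nil => rfl
  | cons p rest ih =>
    by_cases hp : (p.1 == k) = true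
    · simp [pvGet?, hp] at h
    · simp [pvGet?, hp] at h
      simp [pvSet, hp, ih h]

theorem pvGet?_append_none {α : Type} (l l' : List (String × α)) (k : String)
    (h : pvGet? l k = none) : pvGet? (l ++ l') k = pvGet? l' k := by
  induction l with
  | nil => rfl
  | cons p rest ih =>
    by_cases hp : (p.1 == k) = true
    · simp [pvGet?, hp] at h
    · simp [pvGet?, hp] at h ⊢
      exact ih h

theorem keys_pvSet_of_some {α : Type} (l : List (String × α)) (k : String) (v : α)
    (h : pvGet? l k ≠ none) : (pvSet l k v).map Prod.fst = l.map Prod.fst := by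
  induction l with
  | nil => simp [pvGet?] at h
  | cons p rest ih =>
    by_cases hp : (p.1 == k) = true
    · have hpk : p.1 = k := by simpa [beq_iff_eq] using hp
      simp [pvSet, hp, hpk]
    · simp only [pvGet?, hp, if_neg, Bool.false_eq_true, not_false_iff] at h
      simp [pvSet, hp, ih h]

theorem nodup_keys_pvSet {α : Type} (l : List (String × α)) (k : String) (v : α)
    (h : (l.map Prod.fst).Nodup) : ((pvSet l k v).map Prod.fst).Nodup := by
  by_cases hn : pvGet? l k = none
  · rw [pvSet_append_of_none l k v hn]
    have hk : k ∉ l.map Prod.fst := (pvGet?_eq_none_iff l k).1 hn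
    rw [List.map_append]
    apply List.Nodup.append h (by simp)
    intro a ha he
    exact hk ((show a = k by simpa using he) ▸ ha)
  · rw [keys_pvSet_of_some l k v hn]; exact h

-- mkInner of an extended source list = one more in-place insert
theorem pvMkInner_append (ss : List String) (s : String) :
    pvMkInner (ss ++ [s]) = pvSet (pvMkInner ss) s false := by
  simp [pvMkInner, List.foldl_append]

-- lookup in the closed form (under 'conj d'), no key-uniqueness needed
theorem pvGet?_pvCF (modules : List (String × String × List String)) (inc : List (String × List String))
    (d : String) (hd : pvConj modules d = true) :
    pvGet? (pvCF modules inc) d = (pvGet? inc d).map pvMkInner := by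
  simp only [pvCF]
  induction inc with
  | nil => rfl
  | cons p rest ih =>
    by_cases hc : pvConj modules p.1 = true
    · by_cases hpd : (p.1 == d) = true <;> simp [List.filter_cons, hc, pvGet?, hpd, ih]
    · have hpd : ¬ ((p.1 == d) = true) := by
        intro he
        rw [show p.1 = d from by simpa [beq_iff_eq] using he] at hc
        exact hc hd
      simp [List.filter_cons, hc, pvGet?, hpd, ih]

-- closed form ignores an update at a non-conjunction key
theorem pvCF_pvSet_neg (modules : List (String × String × List String)) (inc : List (String × List String))
    (d : String) (v : List String) (hd : pvConj modules d = false) :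
    pvCF modules (pvSet inc d v) = pvCF modules inc := by
  simp only [pvCF]
  induction inc with
  | nil => simp [pvSet, List.filter_cons, hd]
  | cons p rest ih =>
    by_cases hpd : (p.1 == d) = true
    · have hc : pvConj modules p.1 = false := by
        rw [show p.1 = d from by simpa [beq_iff_eq] using hpd]; exact hd
      simp [pvSet, hpd, List.filter_cons, hc, hd]
    · by_cases hc : pvConj modules p.1 = true <;>
        simp [pvSet, hpd, List.filter_cons, hc, ih]

-- closed form of an update at a conjunction key = in-place insert into the closed form
theorem pvCF_pvSet_pos (modules : List (String × String × List String)) (inc : List (String × List String))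
    (d : String) (v : List String) (hd : pvConj modules d = true) :
    pvCF modules (pvSet inc d v) = pvSet (pvCF modules inc) d (pvMkInner v) := by
  simp only [pvCF]
  induction inc with
  | nil => simp [pvSet, List.filter_cons, hd]
  | cons p rest ih =>
    by_cases hpd : (p.1 == d) = true
    · have heq : p.1 = d := by simpa [beq_iff_eq] using hpd
      have hc : pvConj modules p.1 = true := by rw [heq]; exact hd
      simp [pvSet, hpd, List.filter_cons, hc, hd, heq]
    · by_cases hc : pvConj modules p.1 = true
      · simp [pvSet, hpd, List.filter_cons, hc, ih]
      · simp [pvSet, hpd, List.filter_cons, hc, ih]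

-- the A-side fold over the edge list equals the closed form of the grouped index
theorem foldA_eq_pvCF_grp (modules : List (String × String × List String)) (E : List (String × String)) :
    E.foldl (pvStepA modules) [] = pvCF modules (E.foldl pvStepG []) := by
  induction E using List.reverseRecOn with
  | nil => rfl
  | append_singleton E e ih =>
    rcases e with ⟨s, d⟩
    rw [List.foldl_append, List.foldl_append]
    simp only [List.foldl_cons, List.foldl_nil, ih]
    by_cases hd : pvConj modules d = true
    · simp only [pvStepA, pvStepG, hd, if_pos]
      rw [pvCF_pvSet_pos modules _ d _ hd, pvMkInner_append]
      congr 1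
      simp only [pvGetD, pvGet?_pvCF modules _ d hd]
      cases pvGet? (E.foldl pvStepG []) d <;> simp [pvMkInner]
    · simp only [pvStepA, pvStepG, hd, if_neg, Bool.false_eq_true, not_false_iff]
      rw [pvCF_pvSet_neg modules _ d _ (by simpa using hd)]

-- the grouped index has pairwise-distinct keys
theorem nodup_keys_foldG (E : List (String × String)) :
    (((E.foldl pvStepG ([] : List (String × List String))).map Prod.fst)).Nodup := by
  induction E using List.reverseRecOn with
  | nil => simp
  | append_singleton E e ih =>
    rw [List.foldl_append]
    exact nodup_keys_pvSet _ _ _ ih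

-- the second pass over a distinct-keyed index equals the closed form
theorem foldl_step2_eq_pvCF (modules : List (String × String × List String))
    (inc : List (String × List String)) (mem : List (String × List (String × Bool)))
    (hnd : (inc.map Prod.fst).Nodup)
    (hfresh : ∀ p ∈ inc, pvGet? mem p.1 = none) :
    inc.foldl (pvStep2 modules) mem = mem ++ pvCF modules inc := by
  induction inc generalizing mem with
  | nil => simp [pvCF]
  | cons p rest ih =>
    simp only [List.map_cons, List.nodup_cons] at hnd
    have hfp : pvGet? mem p.1 = none := hfresh p (by simp)
    have hfresh' : ∀ q ∈ rest, pvGet? (mem ++ [(p.1, pvMkInner p.2)]) q.1 = none := by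
      intro q hq
      rw [pvGet?_append_none _ _ _ (hfresh q (by simp [hq]))]
      have hne : q.1 ≠ p.1 := by
        intro he; exact hnd.1 (he ▸ List.mem_map.2 ⟨q, hq, rfl⟩)
      simp [pvGet?, beq_iff_eq, Ne.symm hne]
    by_cases hc : pvConj modules p.1 = true
    · simp only [List.foldl_cons, pvStep2, hc, if_pos]
      rw [pvSet_append_of_none mem p.1 _ hfp]
      rw [ih _ hnd.2 hfresh']
      simp [pvCF, List.filter_cons, hc]
    · simp only [List.foldl_cons, pvStep2, hc, if_neg, Bool.false_eq_true, not_false_iff]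
      rw [ih _ hnd.2 (fun q hq => hfresh q (by simp [hq]))]
      simp [pvCF, List.filter_cons, hc]

-- ===== VERDICT (by name: the statement is the Claim_ definition above) =====
theorem init_memory_spec : Claim_equal_init_memory := by
  intro modules _
  unfold Spec_init_memory
  rw [init_memory_eq_foldl_edges]
  simp only [init_memory_alt]
  rw [incoming_eq_foldl_edges, secondPass_eq]
  rw [foldl_step2_eq_pvCF modules _ [] (nodup_keys_foldG _) (by intro p _; rfl)]
  rw [foldA_eq_pvCF_grp]
  simp
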